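-- pv_equiv track=rewrite | github.com/HanseulJo/position-coupling | src/data/multiplication.py | generate_scratchpad_multiplication
-- ===== SOURCE A (Python) =====
-- from typing import Iterable
--
-- def generate_scratchpad_multiplication(numbers:list, reversed_num=True, pad_len=(0,0)):
--     A, B = numbers
--     # Set pad_len_1 and pad_len_2
--     if isinstance(pad_len, Iterable):
--         if len(pad_len) == 2:
--             pad_len_1, pad_len_2 = pad_len
--         else:
--             # set both pad_len_1 and pad_len_2 as the first item of pad_len
--             pad_len = list(pad_len)[0]
--             pad_len_1, pad_len_2 = pad_len, pad_len
--     else: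
--         pad_len_1, pad_len_2 = pad_len, pad_len
--     pad_len_1 = max(len(str(A)), pad_len_1)  # in order to A*0 = 00...0
--     pad_len_2 = max(len(str(A)), pad_len_2)  # in order to 0+0 = 00...0
--
--     # Nx1 Decomposition: Turn Multiplication into "(shifted) Addition with Multiple Operands"
--     B_list = list(map(int, str(B)))[::-1]  # 105 -> [5, 0, 1]
--     nby1_decomp = [A*b for b in B_list]
--     nby1_decomp_str = list(map(str, nby1_decomp))
--     nby1_decomp_str = ['P'*max(0, pad_len_1-len(comp)) + comp for comp in nby1_decomp_str]
--     if reversed_num: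
--         nby1_decomp_str = [x[::-1] for x in nby1_decomp_str]
--     scratchpad = '+'.join(nby1_decomp_str) + '='
--
--     # Resolve the (shifted) Addition with Multiple Operands
--     cum_sums = [0]
--     mul_10 = 1
--     for num in nby1_decomp:
--         cum_sums.append(cum_sums[-1] + num * mul_10)
--         mul_10 *= 10
--     cum_sums_str = ['P'*max(0, pad_len_2-len(csum)) + csum for csum in map(str, cum_sums[1:])]
--     if reversed_num:
--         cum_sums_str = [x[::-1] for x in cum_sums_str]
--     scratchpad += '>'.join(cum_sums_str)
--     return scratchpad
-- ===== SOURCE B (Python) =====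
-- from typing import Iterable
--
-- def generate_scratchpad_multiplication(numbers: list, reversed_num=True, pad_len=(0, 0)):
--     A, B = numbers
--     if isinstance(pad_len, Iterable):
--         pl = list(pad_len)
--         if len(pl) == 2:
--             pad_len_1, pad_len_2 = pl
--         else:
--             pad_len_1 = pad_len_2 = pl[0]
--     else:
--         pad_len_1 = pad_len_2 = pad_len
--     width = len(str(A))
--     pad_len_1 = max(width, pad_len_1)
--     pad_len_2 = max(width, pad_len_2)
--
--     def fmt(n, pad):
--         s = str(n)
--         s = 'P' * max(0, pad - len(s)) + s
--         return s[::-1] if reversed_num else s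
--
--     # digits of B, least significant first, by arithmetic instead of string parsing
--     digits = []
--     b = B
--     while b >= 10:
--         digits.append(b % 10)
--         b //= 10
--     digits.append(b)
--
--     first = '+'.join(fmt(A * d, pad_len_1) for d in digits)
--     second = '>'.join(fmt(A * (B % 10 ** (k + 1)), pad_len_2) for k in range(len(digits)))
--     return first + '=' + second
-- ===== Notes on version B (the rewrite author's own statement) =====
-- stated objective: alternative
-- what changed: B extracts B's digits by repeated divmod arithmetic instead of parsing str(B), and computes each partial sum independently as the closed form A*(B % 10**(k+1)) instead of A's running accumulator with a mul_10 state.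
import Mathlib
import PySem

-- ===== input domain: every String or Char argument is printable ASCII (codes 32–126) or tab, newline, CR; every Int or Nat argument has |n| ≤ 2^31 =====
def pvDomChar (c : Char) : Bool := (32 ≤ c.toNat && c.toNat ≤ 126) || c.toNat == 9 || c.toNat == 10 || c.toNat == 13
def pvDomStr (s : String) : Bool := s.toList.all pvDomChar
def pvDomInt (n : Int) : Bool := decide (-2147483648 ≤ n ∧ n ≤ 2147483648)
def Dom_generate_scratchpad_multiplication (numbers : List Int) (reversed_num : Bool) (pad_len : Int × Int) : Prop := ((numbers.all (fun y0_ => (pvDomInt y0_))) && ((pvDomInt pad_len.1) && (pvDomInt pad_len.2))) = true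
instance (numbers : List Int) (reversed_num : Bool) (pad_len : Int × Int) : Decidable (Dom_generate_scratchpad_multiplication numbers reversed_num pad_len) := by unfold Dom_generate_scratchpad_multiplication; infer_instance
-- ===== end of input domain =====

-- B re-implements the scratchpad builder with digits of B obtained by div/mod arithmetic and each partial
-- sum as an independent closed form A*(B % 10^(k+1)) instead of A's string-parsed digits and running
-- accumulator; objective: alternative (same result, different decomposition; no speed claim).

-- ===== PORT A =====
-- int(c) for a single character; where Python's int() raises, ofChars? is none (such inputs are outside Pre_)
def pvCharInt (c : Char) : Int := (PySem.Int.ofChars? [c]).getD 0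

def generate_scratchpad_multiplication (numbers : List Int) (reversed_num : Bool) (pad_len : Int × Int) : String :=
  -- A, B = numbers  (raises unless len(numbers) == 2; excluded by Pre_)
  let A := PySem.List.pyGetD numbers 0 0
  let B := PySem.List.pyGetD numbers 1 0
  -- pad_len : Int × Int is always an iterable of length 2, so the first branch applies
  let pad_len_1 := max (((PySem.Int.toChars A).length : Int)) pad_len.1
  let pad_len_2 := max (((PySem.Int.toChars A).length : Int)) pad_len.2
  -- B_list = list(map(int, str(B)))[::-1]  ([::-1] is reverse, PySem.List.slice?_none_none_neg_one)
  let B_list := ((PySem.Int.toChars B).map pvCharInt).reverse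
  let nby1_decomp := B_list.map (fun b => A * b)
  let nby1_decomp_str := nby1_decomp.map PySem.Int.toChars
  let nby1_decomp_str := nby1_decomp_str.map (fun comp => List.replicate (max 0 (pad_len_1 - (comp.length : Int))).toNat 'P' ++ comp)
  let nby1_decomp_str := if reversed_num then nby1_decomp_str.map List.reverse else nby1_decomp_str
  let scratchpad := PySem.Chars.join ['+'] nby1_decomp_str ++ ['=']
  -- cum_sums = [0]; mul_10 = 1; for num in nby1_decomp: append cum_sums[-1] + num*mul_10; mul_10 *= 10
  let st := nby1_decomp.foldl
    (fun (st : List Int × Int) num => (st.1 ++ [PySem.List.pyGetD st.1 (-1) 0 + num * st.2], st.2 * 10))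
    ([0], 1)
  let cum_tail := PySem.List.slice st.1 (some 1) none
  let cum_sums_str := (cum_tail.map PySem.Int.toChars).map (fun csum => List.replicate (max 0 (pad_len_2 - (csum.length : Int))).toNat 'P' ++ csum)
  let cum_sums_str := if reversed_num then cum_sums_str.map List.reverse else cum_sums_str
  String.ofList (scratchpad ++ PySem.Chars.join ['>'] cum_sums_str)

-- ===== PORT B =====
-- digits of b, least significant first: while b >= 10: emit b % 10, b //= 10; then emit b
def pvDigits (b : Int) : List Int :=
  if h : b < 10 then [b]
  else PySem.Int.mod b 10 :: pvDigits (PySem.Int.floordiv b 10)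
termination_by b.toNat
decreasing_by
  have h1 : (0 : Int) ≤ PySem.Int.floordiv b 10 :=
    (PySem.Int.le_floordiv_iff_mul_le (by norm_num)).mpr (by omega)
  have h2 : PySem.Int.floordiv b 10 < b :=
    (PySem.Int.floordiv_lt_iff_lt_mul (by norm_num)).mpr (by omega)
  omega

-- fmt(n, pad): pad str(n) with 'P' on the left, reverse if reversed_num
def pvFmt (reversed_num : Bool) (pad : Int) (n : Int) : List Char :=
  let s := PySem.Int.toChars n
  let s := List.replicate (max 0 (pad - (s.length : Int))).toNat 'P' ++ s
  if reversed_num then s.reverse else s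

def generate_scratchpad_multiplication_alt (numbers : List Int) (reversed_num : Bool) (pad_len : Int × Int) : String :=
  let A := PySem.List.pyGetD numbers 0 0
  let B := PySem.List.pyGetD numbers 1 0
  let width := ((PySem.Int.toChars A).length : Int)
  let pad_len_1 := max width pad_len.1
  let pad_len_2 := max width pad_len.2
  let digits := pvDigits B
  let first := PySem.Chars.join ['+'] (digits.map (fun d => pvFmt reversed_num pad_len_1 (A * d)))
  let second := PySem.Chars.join ['>']
    ((PySem.List.pyRange 0 (PySem.List.len digits) 1).map
      (fun k => pvFmt reversed_num pad_len_2 (A * PySem.Int.mod B ((10 : Int) ^ (k + 1).toNat))))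
  String.ofList (first ++ ['='] ++ second)

-- ===== PRECONDITION & SPEC =====
-- Pre_ excludes exactly the inputs where A raises ValueError: numbers not of length 2 (unpacking
-- 'A, B = numbers' fails) or a negative B (int() rejects the '-' character of str(B)).
def Pre_generate_scratchpad_multiplication (numbers : List Int) (reversed_num : Bool) (pad_len : Int × Int) : Prop :=
  numbers.length = 2 ∧ 0 ≤ numbers.getD 1 0
instance (numbers : List Int) (reversed_num : Bool) (pad_len : Int × Int) : Decidable (Pre_generate_scratchpad_multiplication numbers reversed_num pad_len) := by unfold Pre_generate_scratchpad_multiplication; infer_instance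
def pvWitness_generate_scratchpad_multiplication : List Int × Bool × (Int × Int) := ([3, 12], true, (0, 0))

def Spec_generate_scratchpad_multiplication (numbers : List Int) (reversed_num : Bool) (pad_len : Int × Int) (out : String) : Prop := out = generate_scratchpad_multiplication_alt numbers reversed_num pad_len
instance (numbers : List Int) (reversed_num : Bool) (pad_len : Int × Int) (out : String) : Decidable (Spec_generate_scratchpad_multiplication numbers reversed_num pad_len out) := by unfold Spec_generate_scratchpad_multiplication; infer_instance

-- ===== CLAIM (what is proved, stated in full; the proofs are below) =====
def Claim_equal_generate_scratchpad_multiplication : Prop := ∀ (numbers : List Int) (reversed_num : Bool) (pad_len : Int × Int), Dom_generate_scratchpad_multiplication numbers reversed_num pad_len → Pre_generate_scratchpad_multiplication numbers reversed_num pad_len → Spec_generate_scratchpad_multiplication numbers reversed_num pad_len (generate_scratchpad_multiplication numbers reversed_num pad_len)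

-- ===== LEMMAS AND PROOFS =====

-- digits of a natural number, least significant first (proof-side mirror of pvDigits)
def pvDigNat (m : Nat) : List Nat :=
  if m < 10 then [m] else m % 10 :: pvDigNat (m / 10)
termination_by m
decreasing_by exact Nat.div_lt_self (by omega) (by norm_num)

lemma pvDigits_natCast (m : Nat) : pvDigits (m : Int) = (pvDigNat m).map (fun d : Nat => (d : Int)) := by
  induction m using Nat.strong_induction_on with
  | _ m ih =>
    rw [pvDigits, pvDigNat]
    by_cases h : m < 10
    · simp [h, show (m : Int) < 10 by exact_mod_cast h]
    · have h10 : ¬ (m : Int) < 10 := by exact_mod_cast h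
      rw [dif_neg h10, if_neg h]
      have e1 : PySem.Int.mod (m : Int) 10 = ((m % 10 : Nat) : Int) := by
        exact_mod_cast PySem.Int.mod_natCast m 10
      have e2 : PySem.Int.floordiv (m : Int) 10 = ((m / 10 : Nat) : Int) := by
        exact_mod_cast PySem.Int.floordiv_natCast m 10
      rw [e1, e2, ih (m / 10) (Nat.div_lt_self (by omega) (by norm_num))]
      simp

lemma pvDigNat_lt (m : Nat) : ∀ d ∈ pvDigNat m, d < 10 := by
  induction m using Nat.strong_induction_on with
  | _ m ih =>
    rw [pvDigNat]
    by_cases h : m < 10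
    · simp [h]
    · rw [if_neg h]
      intro d hd
      rcases List.mem_cons.mp hd with h1 | h1
      · omega
      · exact ih (m / 10) (Nat.div_lt_self (by omega) (by norm_num)) d h1

lemma pvToDigitsCore_eq (fuel : Nat) : ∀ (m : Nat) (acc : List Char), m < fuel →
    Nat.toDigitsCore 10 fuel m acc = (pvDigNat m).reverse.map Nat.digitChar ++ acc := by
  induction fuel with
  | zero => intro m acc h; omega
  | succ f ih =>
    intro m acc h
    rw [Nat.toDigitsCore]
    by_cases h10 : m < 10
    · have hz : m / 10 = 0 := Nat.div_eq_of_lt h10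
      simp [hz, pvDigNat, h10, Nat.mod_eq_of_lt h10]
    · have hz : ¬ m / 10 = 0 := by
        intro h0
        have := Nat.lt_of_div_eq_zero (by norm_num) h0
        omega
      have hlt : m / 10 < m := Nat.div_lt_self (by omega) (by norm_num)
      simp only [hz, if_false]
      rw [ih (m / 10) _ (by omega)]
      conv_rhs => rw [pvDigNat, if_neg h10]
      simp

lemma pvCharInt_digitChar (d : Nat) (h : d < 10) : pvCharInt (Nat.digitChar d) = (d : Int) := by
  interval_cases d <;> decide

lemma pvBList_eq (m : Nat) :
    ((PySem.Int.toChars (m : Int)).map pvCharInt).reverse = (pvDigNat m).map (fun d : Nat => (d : Int)) := by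
  have h : PySem.Int.toChars (m : Int) = Nat.toDigits 10 m := by
    simp [PySem.Int.toChars]
  rw [h, Nat.toDigits, pvToDigitsCore_eq (m + 1) m [] (by omega), List.append_nil,
    List.map_reverse, List.map_reverse, List.reverse_reverse, List.map_map]
  apply List.map_congr_left
  intro d hd
  simpa using pvCharInt_digitChar d (pvDigNat_lt m d hd)

-- A's cumulative loop, as the list it appends (proof-side)
def pvALoop (ds : List Int) (last mul : Int) : List Int :=
  match ds with
  | [] => []
  | d :: t => (last + d * mul) :: pvALoop t (last + d * mul) (mul * 10)

lemma pvFold_eq (ds : List Int) : ∀ (pre : List Int) (x : Int) (mul : Int),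
    (ds.foldl (fun (st : List Int × Int) num =>
        (st.1 ++ [PySem.List.pyGetD st.1 (-1) 0 + num * st.2], st.2 * 10)) (pre ++ [x], mul)).1
      = (pre ++ [x]) ++ pvALoop ds x mul := by
  induction ds with
  | nil => intro pre x mul; simp [pvALoop]
  | cons d t ih =>
    intro pre x mul
    simp only [List.foldl_cons, pvALoop]
    rw [PySem.List.pyGetD_neg_one_append_singleton]
    simpa [List.append_assoc] using ih (pre ++ [x]) (x + d * mul) (mul * 10)

lemma pvALoop_eq (m : Nat) : ∀ (A last mul : Int),
    pvALoop (List.map (fun d : Nat => A * (d : Int)) (pvDigNat m)) last mul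
      = (List.range (pvDigNat m).length).map
          (fun k => last + mul * (A * ((m % 10 ^ (k + 1) : Nat) : Int))) := by
  induction m using Nat.strong_induction_on with
  | _ m ih =>
    intro A last mul
    rw [pvDigNat]
    by_cases h : m < 10
    · rw [if_pos h]
      simp only [List.map_cons, List.map_nil, pvALoop, List.length_cons, List.length_nil]
      congr 1
      beta_reduce
      rw [show (0 : Nat) + 1 = 1 from rfl, pow_one, Nat.mod_eq_of_lt h]
      ring
    · rw [if_neg h]
      simp only [List.map_cons, pvALoop]
      rw [ih (m / 10) (Nat.div_lt_self (by omega) (by norm_num))]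
      rw [List.length_cons, List.range_succ_eq_map]
      simp only [List.map_cons, List.map_map]
      congr 1
      · beta_reduce
        rw [show (0 : Nat) + 1 = 1 from rfl, pow_one]
        ring
      · apply List.map_congr_left
        intro k _
        simp only [Function.comp]
        have hm : m % 10 ^ (k + 1 + 1) = m % 10 + 10 * (m / 10 % 10 ^ (k + 1)) := by
          rw [pow_succ']
          exact Nat.mod_mul
        rw [hm]
        push_cast
        ring

-- ===== VERDICT (by name: the statement is the Claim_ definition above) =====
theorem generate_scratchpad_multiplication_spec : Claim_equal_generate_scratchpad_multiplication := by
  intro numbers rev pad _hDom hPre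
  unfold Spec_generate_scratchpad_multiplication
  obtain ⟨hlen, hpos⟩ := hPre
  rcases numbers with _ | ⟨a, rest⟩
  · simp at hlen
  rcases rest with _ | ⟨b, rest2⟩
  · simp at hlen
  rcases rest2 with _ | ⟨c, rest3⟩
  case cons.cons.cons => simp at hlen
  simp only [List.getD, List.getElem?_cons_succ, List.getElem?_cons_zero, Option.getD_some] at hpos
  obtain ⟨m, rfl⟩ : ∃ m : Nat, b = (m : Int) := ⟨b.toNat, (Int.toNat_of_nonneg hpos).symm⟩
  simp only [generate_scratchpad_multiplication, generate_scratchpad_multiplication_alt]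
  have hg0 : PySem.List.pyGetD [a, (m : Int)] 0 0 = a := by simp [pysem]
  have hg1 : PySem.List.pyGetD [a, (m : Int)] 1 0 = (m : Int) := by simp [pysem]
  simp only [hg0, hg1, pvBList_eq m, pvDigits_natCast m, List.map_map, Function.comp_def]
  have hfold := pvFold_eq (List.map (fun d : Nat => a * (d : Int)) (pvDigNat m)) [] 0 1
  simp only [List.nil_append] at hfold
  have hsl : ∀ xs : List Int, PySem.List.slice xs (some 1) none = xs.drop 1 := by
    intro xs
    simpa using PySem.List.slice_from xs (show (0 : Int) ≤ 1 by norm_num)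
  simp only [hfold, hsl, PySem.List.len_eq, List.length_map]
  rw [pvALoop_eq m a 0 1, PySem.List.pyRange_zero_natCast]
  simp only [List.singleton_append, List.drop_succ_cons, List.map_map, Function.comp_def]
  have hfun : (fun k : Nat => pvFmt rev (max (↑(PySem.Int.toChars a).length) pad.2)
        (a * PySem.Int.mod (↑m) ((10 : Int) ^ ((k : Int) + 1).toNat)))
      = (fun k : Nat => pvFmt rev (max (↑(PySem.Int.toChars a).length) pad.2)
        (0 + 1 * (a * ((m % 10 ^ (k + 1) : Nat) : Int)))) := by
    funext k
    congr 1
    have h1 : ((k : Int) + 1).toNat = k + 1 := by omega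
    have h2 : ((10 : Int) ^ (k + 1)) = ((10 ^ (k + 1) : Nat) : Int) := by push_cast; ring
    rw [h1, h2, PySem.Int.mod_natCast]
    ring
  simp only [hfun]
  cases rev <;> simp [pvFmt, Function.comp_def]
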